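-- pv_equiv track=rewrite | github.com/puter2/Advent-of-code-2025 | day9/part2.py | is_rectangle_outside
-- ===== SOURCE A (Python) =====
-- def is_rectangle_outside(outside, corner1, corner2):
--     x1, y1 = corner1
--     x2, y2 = corner2
--     for i in range(min(x1,x2), max(x1,x2)):
--         if (i, y1) in outside or (i, y2) in outside:
--             return False
--     for i in range(min(y1,y2), max(y1,y2)):
--         if (x1, i) in outside or (x2, i) in outside:
--             return False
--     return True
-- ===== SOURCE B (Python) =====
-- def is_rectangle_outside(outside, corner1, corner2):
--     x1, y1 = corner1
--     x2, y2 = corner2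
--     minx, maxx = min(x1, x2), max(x1, x2)
--     miny, maxy = min(y1, y2), max(y1, y2)
--     for px, py in outside:
--         if (py == y1 or py == y2) and minx <= px < maxx:
--             return False
--         if (px == x1 or px == x2) and miny <= py < maxy:
--             return False
--     return True
-- ===== Notes on version B (the rewrite author's own statement) =====
-- stated objective: alternative
-- what changed: Instead of walking every cell of the rectangle's perimeter and testing membership in the list `outside`, B makes a single pass over `outside` and tests each point against the four perimeter ranges; the iteration domain changes from O(perimeter)*O(|outside|) membership scans to one O(|outside|) pass.
import Mathlib
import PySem

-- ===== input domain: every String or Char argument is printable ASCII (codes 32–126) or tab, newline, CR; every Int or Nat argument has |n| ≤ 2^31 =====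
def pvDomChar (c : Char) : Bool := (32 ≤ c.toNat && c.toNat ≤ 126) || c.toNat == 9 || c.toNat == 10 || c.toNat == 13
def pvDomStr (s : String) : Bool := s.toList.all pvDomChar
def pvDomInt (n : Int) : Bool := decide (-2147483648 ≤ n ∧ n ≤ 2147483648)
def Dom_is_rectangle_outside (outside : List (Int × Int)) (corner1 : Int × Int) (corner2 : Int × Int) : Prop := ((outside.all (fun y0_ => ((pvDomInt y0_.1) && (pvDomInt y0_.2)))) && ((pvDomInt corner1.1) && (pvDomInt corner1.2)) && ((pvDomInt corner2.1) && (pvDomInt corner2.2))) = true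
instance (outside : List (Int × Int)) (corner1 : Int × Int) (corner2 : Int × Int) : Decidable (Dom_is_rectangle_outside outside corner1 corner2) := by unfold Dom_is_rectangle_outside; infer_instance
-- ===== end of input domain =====

-- B replaces A's scan of every perimeter cell (each with a membership scan of `outside`)
-- by a single pass over `outside`, testing each point against the perimeter ranges (alternative).

-- ===== PORT A =====
-- first for-loop: for i in range(min(x1,x2), max(x1,x2)): early return False on a hit
def pvALoop2 (outside : List (Int × Int)) (x1 x2 : Int) : List Int → Bool
  | [] => true
  | i :: rest =>
    if outside.contains (x1, i) || outside.contains (x2, i) then false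
    else pvALoop2 outside x1 x2 rest

def pvALoop1 (outside : List (Int × Int)) (x1 y1 x2 y2 : Int) : List Int → Bool
  | [] => pvALoop2 outside x1 x2 (PySem.List.pyRange (min y1 y2) (max y1 y2) 1)
  | i :: rest =>
    if outside.contains (i, y1) || outside.contains (i, y2) then false
    else pvALoop1 outside x1 y1 x2 y2 rest

def is_rectangle_outside (outside : List (Int × Int)) (corner1 : Int × Int) (corner2 : Int × Int) : Bool :=
  pvALoop1 outside corner1.1 corner1.2 corner2.1 corner2.2
    (PySem.List.pyRange (min corner1.1 corner2.1) (max corner1.1 corner2.1) 1)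

-- ===== PORT B =====
-- single pass over `outside`, early return False when a point lies on the scanned perimeter
def pvBLoop (x1 y1 x2 y2 minx maxx miny maxy : Int) : List (Int × Int) → Bool
  | [] => true
  | (px, py) :: rest =>
    if (py == y1 || py == y2) && (minx ≤ px && px < maxx) then false
    else if (px == x1 || px == x2) && (miny ≤ py && py < maxy) then false
    else pvBLoop x1 y1 x2 y2 minx maxx miny maxy rest

def is_rectangle_outside_alt (outside : List (Int × Int)) (corner1 : Int × Int) (corner2 : Int × Int) : Bool :=
  pvBLoop corner1.1 corner1.2 corner2.1 corner2.2
    (min corner1.1 corner2.1) (max corner1.1 corner2.1)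
    (min corner1.2 corner2.2) (max corner1.2 corner2.2) outside

-- ===== PRECONDITION & SPEC =====
def Spec_is_rectangle_outside (outside : List (Int × Int)) (corner1 : Int × Int) (corner2 : Int × Int) (out : Bool) : Prop := out = is_rectangle_outside_alt outside corner1 corner2
instance (outside : List (Int × Int)) (corner1 : Int × Int) (corner2 : Int × Int) (out : Bool) : Decidable (Spec_is_rectangle_outside outside corner1 corner2 out) := by unfold Spec_is_rectangle_outside; infer_instance

-- ===== CLAIM (what is proved, stated in full; the proofs are below) =====
def Claim_equal_is_rectangle_outside : Prop := ∀ (outside : List (Int × Int)) (corner1 : Int × Int) (corner2 : Int × Int), Dom_is_rectangle_outside outside corner1 corner2 → Spec_is_rectangle_outside outside corner1 corner2 (is_rectangle_outside outside corner1 corner2)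

-- ===== LEMMAS AND PROOFS =====

theorem pvALoop2_eq_any (outside : List (Int × Int)) (x1 x2 : Int) (l : List Int) :
    pvALoop2 outside x1 x2 l
      = !(l.any (fun i => outside.contains (x1, i) || outside.contains (x2, i))) := by
  induction l with
  | nil => rfl
  | cons i rest ih =>
    simp only [pvALoop2, List.any_cons]
    split_ifs with h
    · simp only [h, Bool.true_or, Bool.not_true]
    · simp only [Bool.not_eq_true] at h
      simp only [h, Bool.false_or, ih]

theorem pvALoop1_eq_any (outside : List (Int × Int)) (x1 y1 x2 y2 : Int) (l : List Int) :
    pvALoop1 outside x1 y1 x2 y2 l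
      = ((!(l.any (fun i => outside.contains (i, y1) || outside.contains (i, y2))))
          && pvALoop2 outside x1 x2 (PySem.List.pyRange (min y1 y2) (max y1 y2) 1)) := by
  induction l with
  | nil => simp [pvALoop1]
  | cons i rest ih =>
    simp only [pvALoop1, List.any_cons]
    split_ifs with h
    · simp only [h, Bool.true_or, Bool.not_true, Bool.false_and]
    · simp only [Bool.not_eq_true] at h
      simp only [h, Bool.false_or, ih]

theorem pvBLoop_eq_any (x1 y1 x2 y2 minx maxx miny maxy : Int) (l : List (Int × Int)) :
    pvBLoop x1 y1 x2 y2 minx maxx miny maxy l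
      = !(l.any (fun p =>
          ((p.2 == y1 || p.2 == y2) && (minx ≤ p.1 && p.1 < maxx))
          || ((p.1 == x1 || p.1 == x2) && (miny ≤ p.2 && p.2 < maxy)))) := by
  induction l with
  | nil => rfl
  | cons p rest ih =>
    obtain ⟨px, py⟩ := p
    simp only [pvBLoop, List.any_cons]
    split_ifs with h1 h2
    · simp only [h1, Bool.true_or, Bool.not_true]
    · simp only [Bool.not_eq_true] at h1
      simp only [h1, h2, Bool.false_or, Bool.true_or, Bool.not_true]
    · simp only [Bool.not_eq_true] at h1 h2
      simp only [h1, h2, Bool.false_or, ih]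

theorem pv_key (o : List (Int × Int)) (x1 y1 x2 y2 : Int) :
    ((∃ i ∈ PySem.List.pyRange (min x1 x2) (max x1 x2) 1, (i, y1) ∈ o ∨ (i, y2) ∈ o)
      ∨ (∃ i ∈ PySem.List.pyRange (min y1 y2) (max y1 y2) 1, (x1, i) ∈ o ∨ (x2, i) ∈ o))
    ↔ (∃ p ∈ o,
        ((p.2 = y1 ∨ p.2 = y2) ∧ min x1 x2 ≤ p.1 ∧ p.1 < max x1 x2)
        ∨ ((p.1 = x1 ∨ p.1 = x2) ∧ min y1 y2 ≤ p.2 ∧ p.2 < max y1 y2)) := by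
  simp only [PySem.List.mem_pyRange_one]
  constructor
  · rintro (⟨i, ⟨h1, h2⟩, h3 | h3⟩ | ⟨i, ⟨h1, h2⟩, h3 | h3⟩)
    · exact ⟨(i, y1), h3, Or.inl ⟨Or.inl rfl, h1, h2⟩⟩
    · exact ⟨(i, y2), h3, Or.inl ⟨Or.inr rfl, h1, h2⟩⟩
    · exact ⟨(x1, i), h3, Or.inr ⟨Or.inl rfl, h1, h2⟩⟩
    · exact ⟨(x2, i), h3, Or.inr ⟨Or.inr rfl, h1, h2⟩⟩
  · rintro ⟨⟨px, py⟩, hmem, ⟨hy | hy, h1, h2⟩ | ⟨hx | hx, h1, h2⟩⟩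
    · exact Or.inl ⟨px, ⟨h1, h2⟩, Or.inl (hy ▸ hmem)⟩
    · exact Or.inl ⟨px, ⟨h1, h2⟩, Or.inr (hy ▸ hmem)⟩
    · exact Or.inr ⟨py, ⟨h1, h2⟩, Or.inl (hx ▸ hmem)⟩
    · exact Or.inr ⟨py, ⟨h1, h2⟩, Or.inr (hx ▸ hmem)⟩

-- ===== VERDICT (by name: the statement is the Claim_ definition above) =====
theorem is_rectangle_outside_spec : Claim_equal_is_rectangle_outside := by
  intro outside corner1 corner2 _
  show is_rectangle_outside outside corner1 corner2
      = is_rectangle_outside_alt outside corner1 corner2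
  unfold is_rectangle_outside is_rectangle_outside_alt
  rw [pvALoop1_eq_any, pvALoop2_eq_any, pvBLoop_eq_any, ← Bool.not_or]
  have hx := pv_key outside corner1.1 corner1.2 corner2.1 corner2.2
  congr 1
  rw [Bool.eq_iff_iff]
  simpa only [Bool.or_eq_true, List.any_eq_true, Bool.and_eq_true, Bool.or_eq_true,
    beq_iff_eq, decide_eq_true_eq, List.contains_iff_mem] using hx
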